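-- pv_equiv track=rewrite | github.com/axnsan12/advent-of-code | aocvj/y2023/day4/solver.py | solve
-- ===== SOURCE A (Python) =====
-- from collections import defaultdict
--
-- def solve(data: str) -> tuple[int | str, int | str | None]:
--     answer_a = 0
--     answer_b = 0
--
--     card_copies = defaultdict(int)
--     for (idx, line) in enumerate(data.splitlines(), start=1):
--         numbers = line.split(':')
--         winners, numbers = numbers[1].split('|')
--         winners = {int(x) for x in winners.split() if x}
--         numbers = [int(x) for x in numbers.split() if x]
--
--         numbers_winning = [x for x in numbers if x in winners]
--         if numbers_winning:
--             answer_a += 2 ** (len(numbers_winning) - 1)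
--
--         num_copies = card_copies[idx] + 1
--         for n in range(len(numbers_winning)):
--             card_copies[idx + n + 1] += num_copies
--
--         answer_b += num_copies
--
--     return answer_a, answer_b
-- ===== SOURCE B (Python) =====
-- def solve(data: str) -> tuple[int | str, int | str | None]:
--     # Pass 1: parse every line into its win count (same split(':')/split('|') parsing as A).
--     wins = []
--     for line in data.splitlines():
--         parts = line.split(':')
--         w_str, n_str = parts[1].split('|')
--         winset = {int(x) for x in w_str.split()}
--         wins.append(sum(1 for x in n_str.split() if int(x) in winset))
--
--     # Part A: closed sum over the win counts.
--     answer_a = sum(2 ** (w - 1) for w in wins if w)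
--
--     # Part B by BACKWARD dynamic programming, instead of A's forward push of copy counts:
--     # totals[j] = total number of cards that ONE copy of the j-th remaining card eventually
--     # produces (itself included).  Built back-to-front: a card's total is 1 plus the totals
--     # of the next w cards (clipping past the last card is automatic, totals[:w] is short).
--     # Each original card exists once, so the answer is just the sum of the totals.
--     totals = []
--     for w in reversed(wins):
--         totals.insert(0, 1 + sum(totals[:w]))
--     answer_b = sum(totals)
--     return answer_a, answer_b
-- ===== Notes on version B (the rewrite author's own statement) =====
-- stated objective: alternative
-- what changed: Replaces A's single forward loop (a defaultdict that pushes copy counts onto the next w card indices) by staged passes: parse every line into a list of win counts, compute part A as a closed sum over that list, and compute part B by a backward dynamic program that builds each card's total cascade size (1 plus the totals of the next w cards) back-to-front and sums the per-card totals.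
import Mathlib
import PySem

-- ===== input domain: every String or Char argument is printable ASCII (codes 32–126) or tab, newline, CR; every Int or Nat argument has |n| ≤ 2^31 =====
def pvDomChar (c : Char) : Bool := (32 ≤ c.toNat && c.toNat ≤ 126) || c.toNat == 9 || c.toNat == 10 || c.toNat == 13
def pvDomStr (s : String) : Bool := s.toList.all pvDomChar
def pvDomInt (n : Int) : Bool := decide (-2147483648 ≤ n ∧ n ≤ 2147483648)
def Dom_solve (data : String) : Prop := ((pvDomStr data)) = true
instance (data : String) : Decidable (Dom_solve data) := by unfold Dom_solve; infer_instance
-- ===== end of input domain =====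

-- B replaces A's single forward loop (a defaultdict pushing copy counts to later cards) by a
-- parse pass producing the list of win counts, a closed sum for part A, and a BACKWARD
-- dynamic program for part B (each card's cascade total built back-to-front); objective:
-- alternative algorithm, same exact results.

-- ===== PORT A =====
-- The for-loop over enumerate(data.splitlines(), start=1) as structural recursion; the Option
-- state is `none` exactly where the Python raises (IndexError on parts[1], ValueError on
-- unpacking split('|') or on int()).  `card_copies[idx]` on the defaultdict is ported as
-- `d.getD idx 0`: the defaultdict's key-insertion side effect is invisible to every later
-- read of the dict, which is only ever observed through getD.
def pvLoopA : List (Int × String) → Int × Int × PySem.Dict Int Int → Option (Int × Int)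
  | [], (a, b, _) => some (a, b)
  | (idx, line) :: rest, (a, b, d) =>
    match PySem.Str.split? line ":" with
    | none => none
    | some parts =>
      match PySem.List.pyGet? parts 1 with
      | none => none
      | some seg =>
        match PySem.Str.split? seg "|" with
        | some [wstr, nstr] =>
          match ((PySem.Str.split₀ wstr).filter (fun t => !(t == ""))).mapM PySem.Int.ofStr? with
          | none => none
          | some wvals =>
            let winners : PySem.Set Int := PySem.Set.ofList wvals
            match ((PySem.Str.split₀ nstr).filter (fun t => !(t == ""))).mapM PySem.Int.ofStr? with
            | none => none
            | some nums =>
              let winning := nums.filter (fun x => PySem.Set.contains winners x)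
              let a' := if winning.isEmpty then a else a + 2 ^ (winning.length - 1)
              let nc := d.getD idx 0 + 1
              let d' := (PySem.List.pyRange 0 (winning.length : Int) 1).foldl
                          (fun d n => d.modify (idx + n + 1) 0 (· + nc)) d
              pvLoopA rest (a', b + nc, d')
        | _ => none

def solve (data : String) : Int × Int :=
  match pvLoopA (PySem.List.enumerate (PySem.Str.splitlines data) 1) (0, 0, PySem.Dict.empty) with
  | some r => r
  | none => (0, 0)   -- unreachable under Pre_solve (the Python raises there)

-- ===== PORT B =====
-- sum(1 for x in n_str.split() if int(x) in winset), left to right, none where int() raises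
def pvCountB (ws : PySem.Set Int) (acc : Nat) : List String → Option Nat
  | [] => some acc
  | t :: rest =>
    match PySem.Int.ofStr? t with
    | none => none
    | some v => pvCountB ws (if PySem.Set.contains ws v then acc + 1 else acc) rest

-- pass 1 of Source B, for one line: the win count, none exactly where the parsing raises
def pvParseB (line : String) : Option Nat :=
  match PySem.Str.split? line ":" with
  | none => none
  | some parts =>
    match PySem.List.pyGet? parts 1 with
    | none => none
    | some seg =>
      match PySem.Str.split? seg "|" with
      | some [wstr, nstr] =>
        match (PySem.Str.split₀ wstr).mapM PySem.Int.ofStr? with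
        | none => none
        | some wvals => pvCountB (PySem.Set.ofList wvals) 0 (PySem.Str.split₀ nstr)
      | _ => none

-- Source B's backward loop `for w in reversed(wins): totals.insert(0, 1 + sum(totals[:w]))`
-- prepends one total per card, back to front: exactly this structural recursion
def pvTotalsB : List Nat → List Int
  | [] => []
  | w :: rest => (1 + ((pvTotalsB rest).take w).sum) :: pvTotalsB rest

def solve_alt (data : String) : Int × Int :=
  match (PySem.Str.splitlines data).mapM pvParseB with
  | none => (0, 0)   -- unreachable under Pre_solve (the Python raises there)
  | some wins =>
    (((wins.filter (fun w => w ≠ 0)).map (fun w => (2 : Int) ^ (w - 1))).sum,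
     (pvTotalsB wins).sum)

-- ===== PRECONDITION & SPEC =====
-- a line parses iff it has a ':', the piece after the first ':' has exactly one '|', and every
-- whitespace token on both sides of that '|' is a valid int() literal
def pvLineOk (line : String) : Bool :=
  match PySem.Str.split? line ":" with
  | none => false
  | some parts =>
    match PySem.List.pyGet? parts 1 with
    | none => false
    | some seg =>
      match PySem.Str.split? seg "|" with
      | some [wstr, nstr] =>
        (PySem.Str.split₀ wstr).all (fun t => (PySem.Int.ofStr? t).isSome) &&
        (PySem.Str.split₀ nstr).all (fun t => (PySem.Int.ofStr? t).isSome)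
      | _ => false

-- Pre_ excludes exactly the inputs on which the Python raises (IndexError/ValueError on a
-- malformed line); both A and B raise there.
def Pre_solve (data : String) : Prop :=
  ∀ line ∈ PySem.Str.splitlines data, pvLineOk line = true
instance (data : String) : Decidable (Pre_solve data) := by unfold Pre_solve; infer_instance

def pvWitness_solve : String := "Card 1: 1 2 | 2 3 4\nCard 2: 5 | 5 5"

def Spec_solve (data : String) (out : Int × Int) : Prop := out = solve_alt data
instance (data : String) (out : Int × Int) : Decidable (Spec_solve data out) := by unfold Spec_solve; infer_instance

-- ===== CLAIM (what is proved, stated in full; the proofs are below) =====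
def Claim_equal_solve : Prop := ∀ (data : String), Dom_solve data → Pre_solve data → Spec_solve data (solve data)

-- ===== LEMMAS AND PROOFS =====

-- proof-side model of A's dict: the sliding window of extra copies for the remaining cards
def pvStepW (st : Int × List Int) (w : Nat) : Int × List Int :=
  let (b, pending) := st
  let (c, rest) :=
    match pending with
    | [] => ((1 : Int), ([] : List Int))
    | p :: rest => (1 + p, rest)
  (b + c, (rest.take w).map (· + c) ++ rest.drop w ++ List.replicate (w - rest.length) c)

-- Σ_j pending_j · totals_j (missing pending entries count as 0; extra ones are ignored)
def pvDot : List Int → List Int → Int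
  | _, [] => 0
  | p, t :: ts => p.getD 0 0 * t + pvDot p.tail ts

-- str.split() never yields an empty token
lemma pv_go_ne_nil (s : List Char) : ∀ (cur : List Char) (acc : List (List Char)),
    (∀ t ∈ acc, t ≠ []) → ∀ t ∈ PySem.Chars.split₀.go s cur acc, t ≠ [] := by
  induction s with
  | nil =>
    intro cur acc h t ht
    unfold PySem.Chars.split₀.go at ht
    split at ht
    · exact h t (List.mem_reverse.mp ht)
    · rcases List.mem_cons.mp (List.mem_reverse.mp ht) with h1 | h1
      · next he => subst h1; simpa using fun hc => he (by simp [hc])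
      · exact h t h1
  | cons c rest ih =>
    intro cur acc h t ht
    unfold PySem.Chars.split₀.go at ht
    split at ht
    · split at ht
      · exact ih [] acc h t ht
      · next he =>
        refine ih [] (cur.reverse :: acc) ?_ t ht
        intro u hu
        rcases List.mem_cons.mp hu with h1 | h1
        · subst h1; simpa using fun hc => he (by simp [hc])
        · exact h u h1
    · exact ih (c :: cur) acc h t ht

-- hence the `if x` truthiness filter in A is a no-op
lemma pv_filter_split₀ (s : String) :
    ((PySem.Str.split₀ s).filter (fun t => !(t == ""))) = PySem.Str.split₀ s := by
  apply List.filter_eq_self.mpr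
  intro t ht
  simp only [PySem.Str.split₀] at ht
  rcases List.mem_map.mp ht with ⟨u, hu, rfl⟩
  have hne : u ≠ [] := pv_go_ne_nil _ _ _ (by simp) u hu
  have : (String.ofList u) ≠ "" := fun hc => hne (by simpa using congrArg String.toList hc)
  simp [this]

-- B's token-counting loop counts exactly the parsed numbers that are in the set
lemma pv_countB_eq (S : PySem.Set Int) (ts : List String) : ∀ (acc : Nat),
    pvCountB S acc ts = (ts.mapM PySem.Int.ofStr?).map
      (fun ns => acc + (ns.filter (fun x => PySem.Set.contains S x)).length) := by
  induction ts with
  | nil => intro acc; simp [pvCountB]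
  | cons t rest ih =>
    intro acc
    simp only [pvCountB, List.mapM_cons]
    cases hv : PySem.Int.ofStr? t with
    | none => simp
    | some v =>
      simp only [ih]
      cases hm : rest.mapM PySem.Int.ofStr? with
      | none => simp
      | some ns =>
        by_cases hc : v ∈ S
        · simp [hc]; omega
        · simp [hc]

-- one iteration of A's loop, characterised through B's line parse
lemma pv_loopA_cons (idx : Int) (line : String) (rest : List (Int × String))
    (a b : Int) (d : PySem.Dict Int Int) :
    pvLoopA ((idx, line) :: rest) (a, b, d) =
      match pvParseB line with
      | none => none
      | some w =>
        pvLoopA rest ((if w = 0 then a else a + 2 ^ (w - 1)), b + (d.getD idx 0 + 1),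
          (PySem.List.pyRange 0 (w : Int) 1).foldl
            (fun d' n => d'.modify (idx + n + 1) 0 (· + (d.getD idx 0 + 1))) d) := by
  simp only [pvLoopA, pvParseB, pv_filter_split₀]
  cases h1 : PySem.Str.split? line ":" with
  | none => rfl
  | some parts =>
  dsimp only
  cases h2 : PySem.List.pyGet? parts 1 with
  | none => rfl
  | some seg =>
  dsimp only
  match h3 : PySem.Str.split? seg "|" with
  | none => rfl
  | some [] => rfl
  | some [x] => rfl
  | some (x :: y :: z :: t) => rfl
  | some [wstr, nstr] =>
  dsimp only
  cases h4 : (PySem.Str.split₀ wstr).mapM PySem.Int.ofStr? with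
  | none => rfl
  | some wvals =>
  dsimp only
  simp only [pv_countB_eq]
  cases h5 : (PySem.Str.split₀ nstr).mapM PySem.Int.ofStr? with
  | none => rfl
  | some nums =>
  simp only [Option.map_some, Nat.zero_add]
  cases hL : nums.filter (fun x => PySem.Set.contains (PySem.Set.ofList wvals) x) with
  | nil => simp only [List.isEmpty_nil, List.length_nil, if_true]
  | cons z zs => simp only [List.isEmpty_cons, List.length_cons]; simp

-- the dict update of one card, read back at a later key
lemma pv_dict_fold_getD (w : Nat) (idx nc : Int) (d : PySem.Dict Int Int) (j : Nat) :
    ((PySem.List.pyRange 0 (w : Int) 1).foldl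
        (fun d n => d.modify (idx + n + 1) 0 (· + nc)) d).getD (idx + 1 + (j : Int)) 0 =
      d.getD (idx + 1 + (j : Int)) 0 + (if j < w then nc else 0) := by
  induction w generalizing d with
  | zero => simp [PySem.List.pyRange]
  | succ w ih =>
    have hcast : ((w : Nat) : Int) + 1 = ((w + 1 : Nat) : Int) := by push_cast; ring
    rw [← hcast, PySem.List.pyRange_one_succ_right (by positivity), List.foldl_append]
    simp only [List.foldl_cons, List.foldl_nil]
    rw [PySem.Dict.getD_modify]
    by_cases hj : j = w
    · subst hj
      rw [if_pos (by ring), add_right_comm idx, ih]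
      simp
    · rw [if_neg (by omega), ih]
      by_cases h : j < w
      · simp [h, Nat.lt_succ_of_lt h]
      · simp [h, show ¬ j < w + 1 by omega]

-- the window update of one card, read back at a later offset
lemma pv_window_getD (q : List Int) : ∀ (w : Nat) (c : Int) (j : Nat),
    ((q.take w).map (· + c) ++ q.drop w ++ List.replicate (w - q.length) c).getD j 0 =
      q.getD j 0 + (if j < w then c else 0) := by
  induction q with
  | nil =>
    intro w c j
    simp only [List.take_nil, List.map_nil, List.drop_nil, List.nil_append, List.length_nil,
      Nat.sub_zero, List.getD_nil]
    rcases lt_or_ge j w with h | h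
    · rw [List.getD_eq_getElem?_getD]
      simp [h]
    · rw [List.getD_eq_getElem?_getD]
      simp [show ¬ j < w by omega]
  | cons x xs ih =>
    intro w c j
    cases w with
    | zero => simp
    | succ w =>
      cases j with
      | zero => simp
      | succ j =>
        simp only [List.take_succ_cons, List.map_cons, List.drop_succ_cons, List.length_cons,
          List.cons_append, List.getD_cons_succ, Nat.succ_sub_succ]
        rw [ih w c j]
        simp

-- one step of the window model, written out
lemma pv_stepW_eq (b : Int) (pending : List Int) (w : Nat) :
    pvStepW (b, pending) w =
      (b + (1 + pending.getD 0 0),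
       (pending.tail.take w).map (· + (1 + pending.getD 0 0)) ++ pending.tail.drop w ++
         List.replicate (w - pending.tail.length) (1 + pending.getD 0 0)) := by
  cases pending <;> simp [pvStepW]

lemma pv_tail_getD (pending : List Int) (j : Nat) :
    pending.tail.getD j 0 = pending.getD (j + 1) 0 := by
  cases pending <;> simp

-- main loop correspondence: dict keyed from idx  ≈  pending window
lemma pv_loop_main (ls : List String) : ∀ (idx : Int) (a b : Int)
    (d : PySem.Dict Int Int) (pending : List Int),
    (∀ j : Nat, pending.getD j 0 = d.getD (idx + (j : Int)) 0) →
    pvLoopA (PySem.List.enumerate ls idx) (a, b, d) =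
      (ls.mapM pvParseB).map (fun wins =>
        (a + ((wins.filter (fun w => w ≠ 0)).map (fun w => (2 : Int) ^ (w - 1))).sum,
         (wins.foldl pvStepW (b, pending)).1)) := by
  induction ls with
  | nil =>
    intro idx a b d pending hinv
    simp [PySem.List.enumerate_nil, pvLoopA]
  | cons l ls ih =>
    intro idx a b d pending hinv
    rw [PySem.List.enumerate_cons, pv_loopA_cons]
    cases hp : pvParseB l with
    | none => simp [List.mapM_cons, hp]
    | some w =>
      dsimp only
      have h0 : pending.getD 0 0 = d.getD idx 0 := by
        have := hinv 0; simpa using this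
      have hc : 1 + pending.getD 0 0 = d.getD idx 0 + 1 := by rw [h0]; ring
      have hinv' : ∀ j : Nat,
          ((pending.tail.take w).map (· + (d.getD idx 0 + 1)) ++ pending.tail.drop w ++
            List.replicate (w - pending.tail.length) (d.getD idx 0 + 1)).getD j 0 =
          ((PySem.List.pyRange 0 (w : Int) 1).foldl
            (fun d' n => d'.modify (idx + n + 1) 0 (· + (d.getD idx 0 + 1))) d).getD
              ((idx + 1) + (j : Int)) 0 := by
        intro j
        rw [pv_window_getD, pv_tail_getD, pv_dict_fold_getD]
        rw [hinv (j + 1)]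
        have : idx + ((j + 1 : Nat) : Int) = idx + 1 + (j : Int) := by push_cast; ring
        rw [this]
      rw [ih (idx + 1) _ _ _ _ hinv']
      cases hm : ls.mapM pvParseB with
      | none => simp [List.mapM_cons, hp, hm]
      | some wins =>
        simp only [List.mapM_cons, hp, hm, Option.pure_def, Option.bind_eq_bind, Option.bind_some,
          Option.map_some, Option.some.injEq]
        refine Prod.ext ?_ ?_
        · -- part-A components: pull the head of the filtered sum out
          rcases Nat.eq_zero_or_pos w with hw | hw
          · simp [hw]
          · simp [Nat.pos_iff_ne_zero.mp hw, add_assoc]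
        · -- part-B components: one pvStepW step is exactly A's dict step
          rw [List.foldl_cons, pv_stepW_eq, hc]

-- bumping the first w pending slots by c adds c times the first w totals to the dot product
lemma pv_dot_bump (t : List Int) : ∀ (p q : List Int) (w : Nat) (c : Int),
    (∀ j : Nat, p.getD j 0 = q.getD j 0 + (if j < w then c else 0)) →
    pvDot p t = pvDot q t + c * (t.take w).sum := by
  induction t with
  | nil => intro p q w c _; simp [pvDot]
  | cons t ts ih =>
    intro p q w c h
    have htail : ∀ j : Nat, p.tail.getD j 0 = q.tail.getD j 0 + (if j < w - 1 then c else 0) := by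
      intro j
      rw [pv_tail_getD, pv_tail_getD, h (j + 1)]
      have : (if j + 1 < w then c else 0) = (if j < w - 1 then c else 0) := by
        by_cases hw : j + 1 < w
        · rw [if_pos hw, if_pos (by omega)]
        · rw [if_neg hw, if_neg (by omega)]
      rw [this]
    simp only [pvDot, ih p.tail q.tail (w - 1) c htail, h 0]
    cases w with
    | zero => simp
    | succ w => simp; ring

lemma pv_dot_nil (t : List Int) : pvDot [] t = 0 := by
  induction t with
  | nil => rfl
  | cons x ts ih => simp [pvDot, ih]

-- the window fold equals the backward-DP totals: base sum plus pending ⋅ totals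
lemma pv_fold_eq (ws : List Nat) : ∀ (b : Int) (pending : List Int),
    (ws.foldl pvStepW (b, pending)).1 =
      b + (pvTotalsB ws).sum + pvDot pending (pvTotalsB ws) := by
  induction ws with
  | nil => intro b pending; simp [pvTotalsB, pvDot]
  | cons w rest ih =>
    intro b pending
    rw [List.foldl_cons, pv_stepW_eq, ih]
    have hbump := pv_dot_bump (pvTotalsB rest)
      ((pending.tail.take w).map (· + (1 + pending.getD 0 0)) ++ pending.tail.drop w ++
        List.replicate (w - pending.tail.length) (1 + pending.getD 0 0))
      pending.tail w (1 + pending.getD 0 0)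
      (by intro j; rw [pv_window_getD])
    rw [hbump]
    simp only [pvTotalsB, List.sum_cons, pvDot]
    ring

-- ===== VERDICT (by name: the statement is the Claim_ definition above) =====
theorem solve_spec : Claim_equal_solve := by
  unfold Claim_equal_solve
  intro data _ _
  unfold Spec_solve solve solve_alt
  rw [pv_loop_main (PySem.Str.splitlines data) 1 0 0 PySem.Dict.empty []
        (by intro j; simp)]
  cases hm : (PySem.Str.splitlines data).mapM pvParseB with
  | none => simp
  | some wins =>
    simp [pv_fold_eq, pv_dot_nil]
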